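-- pv_equiv track=rewrite | github.com/kaloob/opteryx | opteryx/storage/schemes/mabel_partitions.py | filter_blobs
-- ===== SOURCE A (Python) =====
-- def filter_blobs(list_of_blobs):
--     def _extract_as_at(path):
--         parts = path.split("/")
--         for part in parts:
--             if part.startswith("as_at_"):
--                 return part
--         return ""
--
--     # work out if there's an as_at part
--     as_ats = {_extract_as_at(blob) for blob in list_of_blobs if "as_at_" in blob}
--     if as_ats:
--         as_ats = sorted(as_ats)
--         as_at = as_ats.pop()
--
--         is_complete = lambda blobs, as_at: any(
--             [blob for blob in blobs if as_at + "/frame.complete" in blob]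
--         )
--         is_invalid = lambda blobs, as_at: any(
--             [blob for blob in blobs if (as_at + "/frame.ignore" in blob)]
--         )
--
--         while not is_complete(list_of_blobs, as_at) or is_invalid(
--             list_of_blobs, as_at
--         ):
--             if len(as_ats) > 0:
--                 as_at = as_ats.pop()
--             else:
--                 return []
--
--         # get_logger().debug(f"Reading Frame `{as_at}`")
--         return [blob for blob in list_of_blobs if (as_at in blob)]
--
--     return list_of_blobs
-- ===== SOURCE B (Python) =====
-- def filter_blobs(list_of_blobs):
--     def _extract_as_at(path):
--         for part in path.split("/"):
--             if part.startswith("as_at_"):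
--                 return part
--         return ""
--
--     candidates = {_extract_as_at(blob) for blob in list_of_blobs if "as_at_" in blob}
--     if not candidates:
--         return list_of_blobs
--
--     valid = [
--         c
--         for c in candidates
--         if any((c + "/frame.complete") in blob for blob in list_of_blobs)
--         and not any((c + "/frame.ignore") in blob for blob in list_of_blobs)
--     ]
--     if not valid:
--         return []
--     best = max(valid)
--     return [blob for blob in list_of_blobs if best in blob]
-- ===== Notes on version B (the rewrite author's own statement) =====
-- stated objective: alternative
-- what changed: A sorts the candidate as_at set ascending and runs a pop-driven while loop descending until the first complete-and-not-ignored candidate; B never sorts: it filters the unsorted candidate set down to the valid ones in one comprehension and takes max() of that list, which is exactly the candidate A's descending scan stops at.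
import Mathlib
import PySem

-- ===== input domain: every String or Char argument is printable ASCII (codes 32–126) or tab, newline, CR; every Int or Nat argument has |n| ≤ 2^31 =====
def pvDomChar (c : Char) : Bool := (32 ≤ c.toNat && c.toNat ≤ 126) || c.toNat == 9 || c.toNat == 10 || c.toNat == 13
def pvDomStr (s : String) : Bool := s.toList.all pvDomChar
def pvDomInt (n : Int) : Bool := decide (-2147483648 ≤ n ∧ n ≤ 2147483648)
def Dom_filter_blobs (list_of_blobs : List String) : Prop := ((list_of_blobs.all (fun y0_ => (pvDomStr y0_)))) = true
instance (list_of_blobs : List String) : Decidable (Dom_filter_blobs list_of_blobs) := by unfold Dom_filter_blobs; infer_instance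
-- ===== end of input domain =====

-- B replaces A's sort-then-descend-with-early-exit (pop-driven while loop over the ascending
-- sorted candidates) by an unsorted filter of the valid candidates followed by max() — no sort,
-- no early-exit loop (objective: alternative).

-- ===== PORT A =====
-- helper _extract_as_at: first path part starting with "as_at_", else ""
def pvExtractLoop : List String → String
  | [] => ""
  | p :: rest => if PySem.Str.startswith p "as_at_" then p else pvExtractLoop rest

def pvExtractAsAt (path : String) : String :=
  -- split? is none only for an empty separator; "/" ≠ "", so getD [] is exact
  pvExtractLoop ((PySem.Str.split? path "/").getD [])

-- is_complete: any([blob for blob in blobs if as_at + "/frame.complete" in blob])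
def pvIsComplete (blobs : List String) (as_at : String) : Bool :=
  !(blobs.filter (fun blob => PySem.Str.isIn (as_at ++ "/frame.complete") blob)).isEmpty

-- is_invalid: any([blob for blob in blobs if as_at + "/frame.ignore" in blob])
def pvIsInvalid (blobs : List String) (as_at : String) : Bool :=
  !(blobs.filter (fun blob => PySem.Str.isIn (as_at ++ "/frame.ignore") blob)).isEmpty

-- the while loop: as_ats holds the remaining sorted candidates, pop() takes the last
def pvWhileA (blobs : List String) (as_ats : List String) (as_at : String) : List String :=
  if !pvIsComplete blobs as_at || pvIsInvalid blobs as_at then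
    match h : PySem.List.pop? as_ats with   -- as_ats.pop() if len(as_ats) > 0
    | some (nxt, rest) => pvWhileA blobs rest nxt
    | none => []
  else blobs.filter (fun blob => PySem.Str.isIn as_at blob)
termination_by as_ats.length
decreasing_by
  have := PySem.List.length_of_pop?_eq_some as_ats h
  simp at this
  omega

def filter_blobs (list_of_blobs : List String) : List String :=
  let as_ats : PySem.Set String :=
    PySem.Set.ofList
      ((list_of_blobs.filter (fun blob => PySem.Str.isIn "as_at_" blob)).map pvExtractAsAt)
  if as_ats ≠ [] then
    match PySem.List.pop? (PySem.List.sorted as_ats (fun x => x) false) with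
    | some (as_at, rest) => pvWhileA list_of_blobs rest as_at
    | none => []   -- unreachable: the sorted list of a nonempty set is nonempty
  else list_of_blobs

-- ===== PORT B =====
-- c is a valid candidate: some blob holds its complete marker and none holds its ignore marker
def pvValidB (blobs : List String) (c : String) : Bool :=
  blobs.any (fun blob => PySem.Str.isIn (c ++ "/frame.complete") blob) &&
  !blobs.any (fun blob => PySem.Str.isIn (c ++ "/frame.ignore") blob)

def filter_blobs_alt (list_of_blobs : List String) : List String :=
  let candidates : PySem.Set String :=
    PySem.Set.ofList
      ((list_of_blobs.filter (fun blob => PySem.Str.isIn "as_at_" blob)).map pvExtractAsAt)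
  if candidates = [] then list_of_blobs
  else
    let valid := candidates.filter (pvValidB list_of_blobs)
    if valid = [] then []
    else
      match PySem.List.max? valid (fun x => x) with   -- max(valid)
      | some best => list_of_blobs.filter (fun blob => PySem.Str.isIn best blob)
      | none => []   -- unreachable: valid ≠ []

-- ===== PRECONDITION & SPEC =====
def Spec_filter_blobs (list_of_blobs : List String) (out : List String) : Prop := out = filter_blobs_alt list_of_blobs
instance (list_of_blobs : List String) (out : List String) : Decidable (Spec_filter_blobs list_of_blobs out) := by unfold Spec_filter_blobs; infer_instance

-- ===== CLAIM =====
def Claim_equal_filter_blobs : Prop := ∀ (list_of_blobs : List String), Dom_filter_blobs list_of_blobs → Spec_filter_blobs list_of_blobs (filter_blobs list_of_blobs)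

-- ===== LEMMAS AND PROOFS =====

theorem pv_filter_isEmpty {α : Type} (l : List α) (p : α → Bool) :
    (l.filter p).isEmpty = !l.any p := by
  induction l with
  | nil => rfl
  | cons x t ih => by_cases h : p x <;> simp [h, ih]

-- A's two flag helpers compute B's validity predicate
theorem pv_valid_eq (blobs : List String) (c : String) :
    (pvIsComplete blobs c && !pvIsInvalid blobs c) = pvValidB blobs c := by
  simp [pvIsComplete, pvIsInvalid, pvValidB, pv_filter_isEmpty]

-- proof-only helper: first valid candidate of a list, and the filtered result for it
def pvFirstValid (blobs : List String) : List String → List String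
  | [] => []
  | c :: rest =>
    if pvValidB blobs c then blobs.filter (fun blob => PySem.Str.isIn c blob)
    else pvFirstValid blobs rest

-- A's backwards pop-loop equals the forwards first-valid scan over the reversed candidates
theorem pv_loop_eq (blobs : List String) (M : List String) (a : String) :
    pvWhileA blobs M a = pvFirstValid blobs (a :: M.reverse) := by
  induction M using List.reverseRecOn generalizing a with
  | nil =>
    unfold pvWhileA
    simp only [pvFirstValid, ← pv_valid_eq]
    cases hco : pvIsComplete blobs a <;> cases hin : pvIsInvalid blobs a <;>
      simp [PySem.List.pop?, PySem.List.pyIdx?, pvFirstValid]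
  | append_singleton M' a' ih =>
    unfold pvWhileA
    rw [PySem.List.pop?_last, List.reverse_append, List.reverse_singleton,
      List.singleton_append]
    cases hco : pvIsComplete blobs a <;> cases hin : pvIsInvalid blobs a <;>
      simp [pvFirstValid, ← pv_valid_eq, hco, hin, ih]

-- the scan is the head of the filtered list
theorem pv_firstValid_eq_head (blobs : List String) (L : List String) :
    pvFirstValid blobs L
      = match (L.filter (pvValidB blobs)).head? with
        | some c => blobs.filter (fun blob => PySem.Str.isIn c blob)
        | none => [] := by
  induction L with
  | nil => rfl
  | cons c rest ih =>
    by_cases h : pvValidB blobs c = true <;> simp [pvFirstValid, h, ih]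

-- in a strictly increasing list every element is ≤ the last
theorem pv_le_getLast (l : List String) (hl : l.Pairwise (· < ·)) (y : String)
    (hy : y ∈ l) (h : l ≠ []) : y ≤ l.getLast h := by
  induction l with
  | nil => simp at hy
  | cons x t ih =>
    rcases List.mem_cons.mp hy with rfl | hy'
    · cases t with
      | nil => simp
      | cons b u =>
        have hx : y < List.getLast (b :: u) (by simp) := by
          have := (List.pairwise_cons.mp hl).1
          exact this _ (List.getLast_mem _)
        simpa [List.getLast_cons] using le_of_lt hx
    · have ht : t ≠ [] := by intro he; subst he; simp at hy'
      have := ih (List.pairwise_cons.mp hl).2 hy' ht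
      simpa [List.getLast_cons ht] using this

theorem pv_main (list_of_blobs : List String) :
    filter_blobs list_of_blobs = filter_blobs_alt list_of_blobs := by
  unfold filter_blobs filter_blobs_alt
  set S : PySem.Set String := PySem.Set.ofList
    ((list_of_blobs.filter (fun blob => PySem.Str.isIn "as_at_" blob)).map pvExtractAsAt)
    with hS
  by_cases hs : S = []
  · simp [hs]
  · rw [if_pos hs, if_neg hs]
    -- A side: rewrite to pvFirstValid over the reversed ascending sort
    have hsortne : PySem.List.sorted S (fun x => x) false ≠ [] := by
      intro h; exact hs ((PySem.List.sorted_eq_nil_iff _ _ _).mp h)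
    rcases hL : PySem.List.sorted S (fun x => x) false with _ | ⟨m, t⟩
    · exact absurd hL hsortne
    obtain ⟨M', last, hsplit⟩ : ∃ M' last, m :: t = M' ++ [last] := by
      rcases List.eq_nil_or_concat (m :: t) with h | ⟨M', last, h⟩
      · simp at h
      · exact ⟨M', last, by simpa [List.concat_eq_append] using h⟩
    rw [hsplit, PySem.List.pop?_last]
    show pvWhileA list_of_blobs M' last = _
    have hA : pvWhileA list_of_blobs M' last
        = pvFirstValid list_of_blobs ((M' ++ [last]).reverse) := by
      rw [List.reverse_append, List.reverse_singleton, List.singleton_append]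
      exact pv_loop_eq list_of_blobs M' last
    rw [hA, ← hsplit, ← hL, pv_firstValid_eq_head]
    -- now compare head? of filter of reversed sorted with max? of filter of S
    have hperm : (PySem.List.sorted S (fun x => x) false).Perm S :=
      PySem.List.sorted_perm _ _ _
    have hpw : (PySem.List.sorted S (fun x => x) false).Pairwise (· < ·) := by
      rw [hS]; exact PySem.List.sorted_ofList_pairwise_lt _
    set F := (PySem.List.sorted S (fun x => x) false).filter (pvValidB list_of_blobs)
      with hF
    have hrev : ((PySem.List.sorted S (fun x => x) false).reverse.filter
        (pvValidB list_of_blobs)).head? = F.getLast? := by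
      rw [List.filter_reverse, List.head?_reverse]
    have hpermF : F.Perm (S.filter (pvValidB list_of_blobs)) := hperm.filter _
    have hpwF : F.Pairwise (· < ·) := hpw.filter _
    rw [hrev]
    by_cases hv : S.filter (pvValidB list_of_blobs) = []
    · have hFnil : F = [] := List.eq_nil_of_length_eq_zero
        (by rw [hpermF.length_eq, hv]; rfl)
      simp [hv, hFnil]
    · rw [if_neg hv]
      have hFne : F ≠ [] := by
        intro h; exact hv (List.eq_nil_of_length_eq_zero (by rw [← hpermF.length_eq, h]; rfl))
      rcases hm : PySem.List.max? (S.filter (pvValidB list_of_blobs)) (fun x => x)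
        with _ | m
      · exact absurd ((PySem.List.max?_eq_none_iff _ _).mp hm) hv
      · have hg : F.getLast? = some (F.getLast hFne) := List.getLast?_eq_some_getLast hFne
        rw [hg]
        have hmem_m : m ∈ F := hpermF.mem_iff.mpr (PySem.List.max?_mem hm)
        have hle1 : m ≤ F.getLast hFne := pv_le_getLast F hpwF m hmem_m hFne
        have hle2 : F.getLast hFne ≤ m :=
          PySem.List.max?_isMax hm _ (hpermF.mem_iff.mp (List.getLast_mem hFne))
        have : F.getLast hFne = m := le_antisymm hle2 hle1
        rw [this]

-- ===== VERDICT =====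
theorem filter_blobs_spec : Claim_equal_filter_blobs := by
  intro l _
  unfold Spec_filter_blobs
  exact pv_main l
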